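-- pv_equiv track=rewrite | github.com/asthyeon/Algorithm | 백준/Silver/20529. 가장 가까운 세 사람의 심리적 거리/가장 가까운 세 사람의 심리적 거리.py | distant
-- ===== SOURCE A (Python) =====
-- def distant(A, B ,C):
--     dist = 0
--     for i in range(4):
--         # 세 명과 비교
--         if A[i] != B[i]:
--             dist += 1
--         if B[i] != C[i]:
--             dist += 1
--         if C[i] != A[i]:
--             dist += 1
--
--     return dist
-- ===== SOURCE B (Python) =====
-- def distant(A, B, C):
--     # per position: distinct-count of the three letters maps to the pair-mismatch count
--     return sum({1: 0, 2: 2, 3: 3}[len({A[i], B[i], C[i]})] for i in range(4))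
-- ===== Notes on version B (the rewrite author's own statement) =====
-- stated objective: simpler
-- what changed: Replaces the three explicit pairwise character comparisons per position with a count-of-distinct-letters set whose cardinality is mapped {1:0,2:2,3:3} to the mismatch count, summed in one comprehension.
-- outside the precondition, e.g. on distant('ab', 'abcd', 'abcd'): A raises IndexError, B raises IndexError
import Mathlib
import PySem

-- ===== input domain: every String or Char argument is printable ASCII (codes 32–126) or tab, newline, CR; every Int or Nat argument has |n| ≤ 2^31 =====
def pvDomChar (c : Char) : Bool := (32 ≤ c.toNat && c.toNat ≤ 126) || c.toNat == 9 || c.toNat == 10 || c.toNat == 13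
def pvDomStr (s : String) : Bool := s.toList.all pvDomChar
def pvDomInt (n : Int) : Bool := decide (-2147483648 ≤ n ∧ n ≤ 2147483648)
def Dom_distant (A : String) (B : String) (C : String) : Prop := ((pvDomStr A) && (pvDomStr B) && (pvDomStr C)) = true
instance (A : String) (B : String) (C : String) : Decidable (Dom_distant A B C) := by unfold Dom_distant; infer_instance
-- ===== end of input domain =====

-- B replaces the three pairwise character comparisons per position with a
-- distinct-letter set whose size is mapped {1:0,2:2,3:3} to the mismatch count (simpler).


-- ===== PORT A =====
-- A[i] etc. via PySem.Str.pyGet?; the '.getD ' '' default is reached only outside Pre_ (Python raises IndexError there)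
def distant (A : String) (B : String) (C : String) : Int :=
  (PySem.List.pyRange 0 4 1).foldl (fun dist i =>
    let a := (PySem.Str.pyGet? A i).getD ' '
    let b := (PySem.Str.pyGet? B i).getD ' '
    let c := (PySem.Str.pyGet? C i).getD ' '
    let dist := if a ≠ b then dist + 1 else dist
    let dist := if b ≠ c then dist + 1 else dist
    if c ≠ a then dist + 1 else dist) 0

-- ===== PORT B =====
-- {A[i],B[i],C[i]} as PySem.Set; dict lookup {1:0,2:2,3:3}[len] via PySem.Dict.get? (never a KeyError: len ∈ {1,2,3})
def distant_alt (A : String) (B : String) (C : String) : Int :=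
  (((PySem.List.pyRange 0 4 1).map (fun i =>
    let s := PySem.Set.ofList [(PySem.Str.pyGet? A i).getD ' ',
                               (PySem.Str.pyGet? B i).getD ' ',
                               (PySem.Str.pyGet? C i).getD ' ']
    (((PySem.Dict.ofList [((1:Int),(0:Int)),(2,2),(3,3)]).get? (PySem.Set.len s)).getD 0))).sum)

-- ===== PRECONDITION & SPEC =====
-- Pre_: A indexes all three strings at 0..3; Python raises IndexError if any is shorter than 4.
def Pre_distant (A : String) (B : String) (C : String) : Prop :=
  4 ≤ A.length ∧ 4 ≤ B.length ∧ 4 ≤ C.length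
instance (A : String) (B : String) (C : String) : Decidable (Pre_distant A B C) := by unfold Pre_distant; infer_instance
def pvWitness_distant : String × String × String := ("INTJ", "ENFP", "ISTP")

def Spec_distant (A : String) (B : String) (C : String) (out : Int) : Prop := out = distant_alt A B C
instance (A : String) (B : String) (C : String) (out : Int) : Decidable (Spec_distant A B C out) := by unfold Spec_distant; infer_instance

-- ===== CLAIM (what is proved, stated in full; the proofs are below) =====
def Claim_equal_distant : Prop := ∀ (A : String) (B : String) (C : String), Dom_distant A B C → Pre_distant A B C → Spec_distant A B C (distant A B C)

-- ===== LEMMAS AND PROOFS =====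

-- per-position agreement: the pairwise mismatch count equals {1:0,2:2,3:3}[#distinct]
theorem pv_point (a b c : Char) :
    (if c ≠ a then (if b ≠ c then (if a ≠ b then (1:Int) else 0) + 1 else (if a ≠ b then (1:Int) else 0)) + 1
     else (if b ≠ c then (if a ≠ b then (1:Int) else 0) + 1 else (if a ≠ b then (1:Int) else 0))) =
    (((PySem.Dict.ofList [((1:Int),(0:Int)),(2,2),(3,3)]).get?
        (PySem.Set.len (PySem.Set.ofList [a, b, c]))).getD 0) := by
  by_cases hab : a = b <;> by_cases hbc : b = c <;> by_cases hca : c = a <;>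
    simp_all [PySem.Set.ofList, PySem.Set.add, PySem.Set.len, PySem.Set.contains, PySem.Set.empty,
      PySem.Dict.ofList, PySem.Dict.get?, List.mem_cons, List.not_mem_nil]
  all_goals try decide
  rw [if_neg (show ¬(b = a) from fun h => hab h.symm),
        if_neg (show c ∉ [a, b] from by
          intro h
          rcases List.mem_cons.mp h with h | h
          · exact hca h
          · exact hbc ((List.mem_singleton.mp h).symm))]
  norm_num
  decide

-- A's step adds the per-position mismatch count to the running total
theorem pv_step (dist : Int) (a b c : Char) :
    (if c ≠ a then (if b ≠ c then (if a ≠ b then dist + 1 else dist) + 1 else (if a ≠ b then dist + 1 else dist)) + 1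
     else (if b ≠ c then (if a ≠ b then dist + 1 else dist) + 1 else (if a ≠ b then dist + 1 else dist))) =
    dist + (((PySem.Dict.ofList [((1:Int),(0:Int)),(2,2),(3,3)]).get?
        (PySem.Set.len (PySem.Set.ofList [a, b, c]))).getD 0) := by
  have h := pv_point a b c
  generalize (((PySem.Dict.ofList [((1:Int),(0:Int)),(2,2),(3,3)]).get?
        (PySem.Set.len (PySem.Set.ofList [a, b, c]))).getD 0) = r at h ⊢
  split_ifs at h ⊢ <;> omega

-- ===== VERDICT (by name: the statement is the Claim_ definition above) =====
theorem distant_spec : Claim_equal_distant := by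
  intro A B C _ _
  unfold Spec_distant distant distant_alt
  simp only [show PySem.List.pyRange 0 4 1 = [0, 1, 2, 3] from rfl,
    List.foldl_cons, List.foldl_nil, List.map_cons, List.map_nil, List.sum_cons, List.sum_nil]
  rw [pv_step, pv_step, pv_step, pv_step]
  ring
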